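-- pv_equiv track=rewrite | github.com/1ytic/hmm-tagger | utils.py | rearrange_data
-- ===== SOURCE A (Python) =====
-- def rearrange_data(sequences):
--     x = []
--     y = []
--     w = set()
--     t = set()
--     for sequence in sequences:
--         sequence_x = []
--         sequence_y = []
--         for word, tag in sequence:
--             sequence_x.append(word)
--             sequence_y.append(tag)
--             w.add(word)
--             t.add(tag)
--         x.append(sequence_x)
--         y.append(sequence_y)
--     return x, y, w, t
-- ===== SOURCE B (Python) =====
-- def _solve(seqs):
--     n = len(seqs)
--     if n == 0:
--         return [], [], set(), set()
--     if n == 1: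
--         s = seqs[0]
--         xs = [word for word, tag in s]
--         ys = [tag for word, tag in s]
--         return [xs], [ys], set(xs), set(ys)
--     mid = n // 2
--     x1, y1, w1, t1 = _solve(seqs[:mid])
--     x2, y2, w2, t2 = _solve(seqs[mid:])
--     return x1 + x2, y1 + y2, w1 | w2, t1 | t2
--
-- def rearrange_data(sequences):
--     return _solve(list(sequences))
-- ===== Notes on version B (the rewrite author's own statement) =====
-- stated objective: alternative
-- what changed: Replaces A's single fused left-to-right loop (appending to lists and adding to sets element by element) with a divide-and-conquer recursion that splits the sequence list in half, solves each half, and combines the halves by list concatenation and set union.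
import Mathlib
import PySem

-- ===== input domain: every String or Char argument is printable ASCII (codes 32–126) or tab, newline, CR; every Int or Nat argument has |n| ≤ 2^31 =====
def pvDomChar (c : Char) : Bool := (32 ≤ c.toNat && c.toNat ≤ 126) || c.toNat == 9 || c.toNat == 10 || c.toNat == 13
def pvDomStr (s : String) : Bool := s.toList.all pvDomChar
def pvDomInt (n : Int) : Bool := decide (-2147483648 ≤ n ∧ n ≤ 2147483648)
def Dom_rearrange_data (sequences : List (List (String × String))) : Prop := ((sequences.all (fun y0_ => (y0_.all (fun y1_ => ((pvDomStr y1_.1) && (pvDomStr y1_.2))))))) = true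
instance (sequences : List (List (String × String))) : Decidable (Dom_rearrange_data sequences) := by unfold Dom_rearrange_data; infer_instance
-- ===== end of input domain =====

-- B replaces A's single fused left-to-right loop by a divide-and-conquer recursion
-- (split in half, solve halves, merge with ++ and set union); alternative, same values.

-- ===== PORT A =====
-- one fused pass: state (x, y, w, t); inner loop appends to the per-sequence lists and adds to the sets
def rearrange_data (sequences : List (List (String × String))) : List (List String) × List (List String) × List String × List String :=
  sequences.foldl
    (fun (st : List (List String) × List (List String) × PySem.Set String × PySem.Set String) sequence =>
      let inner := sequence.foldl
        (fun (s : List String × List String × PySem.Set String × PySem.Set String) wt =>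
          (s.1 ++ [wt.1], s.2.1 ++ [wt.2], PySem.Set.add s.2.2.1 wt.1, PySem.Set.add s.2.2.2 wt.2))
        ([], [], st.2.2.1, st.2.2.2)
      (st.1 ++ [inner.1], st.2.1 ++ [inner.2.1], inner.2.2.1, inner.2.2.2))
    ([], [], PySem.Set.empty, PySem.Set.empty)

-- ===== PORT B =====
-- _solve: divide and conquer; seqs[:mid]/seqs[mid:] with 0 ≤ mid ≤ len are exactly take/drop;
-- seqs[0] on a length-1 list is exactly headI
def rearrangeSolve (seqs : List (List (String × String))) :
    List (List String) × List (List String) × PySem.Set String × PySem.Set String :=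
  if seqs.length = 0 then ([], [], PySem.Set.empty, PySem.Set.empty)
  else if seqs.length = 1 then
    let s := seqs.headI
    let xs := s.map (fun wt => wt.1)
    let ys := s.map (fun wt => wt.2)
    ([xs], [ys], PySem.Set.ofList xs, PySem.Set.ofList ys)
  else
    let mid := seqs.length / 2
    let r1 := rearrangeSolve (seqs.take mid)
    let r2 := rearrangeSolve (seqs.drop mid)
    (r1.1 ++ r2.1, r1.2.1 ++ r2.2.1, PySem.Set.union r1.2.2.1 r2.2.2.1, PySem.Set.union r1.2.2.2 r2.2.2.2)
termination_by seqs.length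
decreasing_by
  · simp only [List.length_take]; omega
  · simp only [List.length_drop]; omega

def rearrange_data_alt (sequences : List (List (String × String))) : List (List String) × List (List String) × List String × List String :=
  rearrangeSolve sequences

-- ===== PRECONDITION & SPEC =====
def Spec_rearrange_data (sequences : List (List (String × String))) (out : List (List String) × List (List String) × List String × List String) : Prop := out = rearrange_data_alt sequences
instance (sequences : List (List (String × String))) (out : List (List String) × List (List String) × List String × List String) : Decidable (Spec_rearrange_data sequences out) := by unfold Spec_rearrange_data; infer_instance

-- ===== CLAIM (what is proved, stated in full; the proofs are below) =====
def Claim_equal_rearrange_data : Prop := ∀ (sequences : List (List (String × String))), Dom_rearrange_data sequences → Spec_rearrange_data sequences (rearrange_data sequences)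

-- ===== LEMMAS AND PROOFS =====

theorem rearrange_inner (seq : List (String × String)) (xa ya : List String) (w t : PySem.Set String) :
    seq.foldl
      (fun (s : List String × List String × PySem.Set String × PySem.Set String) wt =>
        (s.1 ++ [wt.1], s.2.1 ++ [wt.2], PySem.Set.add s.2.2.1 wt.1, PySem.Set.add s.2.2.2 wt.2))
      (xa, ya, w, t)
    = (xa ++ seq.map (fun wt => wt.1), ya ++ seq.map (fun wt => wt.2),
       PySem.Set.update w (seq.map (fun wt => wt.1)), PySem.Set.update t (seq.map (fun wt => wt.2))) := by
  induction seq generalizing xa ya w t with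
  | nil => simp [PySem.Set.update]
  | cons p rest ih => simp [List.foldl, ih, PySem.Set.update]

theorem rearrange_outer (sequences : List (List (String × String))) (x y : List (List String)) (w t : PySem.Set String) :
    sequences.foldl
      (fun (st : List (List String) × List (List String) × PySem.Set String × PySem.Set String) sequence =>
        let inner := sequence.foldl
          (fun (s : List String × List String × PySem.Set String × PySem.Set String) wt =>
            (s.1 ++ [wt.1], s.2.1 ++ [wt.2], PySem.Set.add s.2.2.1 wt.1, PySem.Set.add s.2.2.2 wt.2))
          ([], [], st.2.2.1, st.2.2.2)
        (st.1 ++ [inner.1], st.2.1 ++ [inner.2.1], inner.2.2.1, inner.2.2.2))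
      (x, y, w, t)
    = (x ++ sequences.map (fun sequence => sequence.map (fun wt => wt.1)),
       y ++ sequences.map (fun sequence => sequence.map (fun wt => wt.2)),
       PySem.Set.update w (sequences.flatMap (fun sequence => sequence.map (fun wt => wt.1))),
       PySem.Set.update t (sequences.flatMap (fun sequence => sequence.map (fun wt => wt.2)))) := by
  induction sequences generalizing x y w t with
  | nil => simp [PySem.Set.update]
  | cons seq rest ih =>
    rw [List.foldl_cons]
    dsimp only
    rw [rearrange_inner, ih]
    simp [PySem.Set.update, List.foldl_append]

-- s.update(ofList b) = s.update(b): the dedup in ofList is absorbed by add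
theorem update_ofList (s : PySem.Set String) (b : List String) :
    PySem.Set.update s (PySem.Set.ofList b) = PySem.Set.update s b := by
  induction b using List.reverseRecOn generalizing s with
  | nil => rfl
  | append_singleton ys y ih =>
    rw [PySem.Set.ofList_append_singleton, PySem.Set.add_eq_ite]
    by_cases hy : y ∈ PySem.Set.ofList ys
    · rw [if_pos hy, ih, PySem.Set.update_append]
      have hmem : y ∈ PySem.Set.update s ys := by
        rw [PySem.Set.mem_update]; right; exact (PySem.Set.mem_ofList _ _).mp hy
      simp only [PySem.Set.update] at hmem
      exact (PySem.Set.add_of_mem hmem).symm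
    · rw [if_neg hy, PySem.Set.update_append, PySem.Set.update_append, ih]

theorem union_ofList_ofList (a b : List String) :
    PySem.Set.union (PySem.Set.ofList a) (PySem.Set.ofList b) = PySem.Set.ofList (a ++ b) := by
  rw [PySem.Set.ofList_append]
  show PySem.Set.update (PySem.Set.ofList a) (PySem.Set.ofList b) = _
  rw [update_ofList]

theorem rearrangeSolve_eq (seqs : List (List (String × String))) :
    rearrangeSolve seqs
    = (seqs.map (fun sequence => sequence.map (fun wt => wt.1)),
       seqs.map (fun sequence => sequence.map (fun wt => wt.2)),
       PySem.Set.ofList (seqs.flatMap (fun sequence => sequence.map (fun wt => wt.1))),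
       PySem.Set.ofList (seqs.flatMap (fun sequence => sequence.map (fun wt => wt.2)))) := by
  induction seqs using rearrangeSolve.induct with
  | case1 seqs h0 =>
    rw [List.length_eq_zero_iff] at h0
    subst h0
    simp [rearrangeSolve, PySem.Set.empty]
  | case2 seqs h0 h1 =>
    rw [List.length_eq_one_iff] at h1
    obtain ⟨a, rfl⟩ := h1
    simp [rearrangeSolve, List.headI]
  | case3 seqs h0 h1 mid ihl ihr =>
    rw [rearrangeSolve, if_neg h0, if_neg h1]
    dsimp only
    simp only [show mid = seqs.length / 2 from rfl] at ihl ihr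
    rw [ihl, ihr]
    rw [union_ofList_ofList, union_ofList_ofList,
        ← List.flatMap_append, ← List.flatMap_append,
        ← List.map_append, ← List.map_append,
        List.take_append_drop]

-- ===== VERDICT (by name: the statement is the Claim_ definition above) =====
theorem rearrange_data_spec : Claim_equal_rearrange_data := by
  intro sequences _
  show rearrange_data sequences = rearrange_data_alt sequences
  rw [rearrange_data_alt, rearrangeSolve_eq]
  simp [rearrange_data, rearrange_outer, PySem.Set.ofList_eq_foldl,
    PySem.Set.update, PySem.Set.empty]
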